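-- pv_equiv track=rewrite | github.com/ahamdihussein-star/agentforge | .ai/context/scripts/auto_update.py | should_reindex
-- ===== SOURCE A (Python) =====
-- def should_reindex(changed_files):
--     """Check if any changed files require reindexing"""
--     code_patterns = ['.py']
--     doc_patterns = ['.md']
--
--     has_code_changes = any(
--         any(f.endswith(ext) for ext in code_patterns)
--         for f in changed_files
--     )
--
--     has_doc_changes = any(
--         any(f.endswith(ext) for ext in doc_patterns)
--         for f in changed_files
--     )
--
--     return has_code_changes, has_doc_changes
-- ===== SOURCE B (Python) =====
-- def should_reindex(changed_files):
--     """Check if any changed files require reindexing (single pass, early exit)"""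
--     has_code = False
--     has_doc = False
--     for f in changed_files:
--         if f.endswith('.py'):
--             has_code = True
--         if f.endswith('.md'):
--             has_doc = True
--         if has_code and has_doc:
--             break
--     return has_code, has_doc
-- ===== Notes on version B (the rewrite author's own statement) =====
-- stated objective: faster
-- what changed: Replaces A's two independent any()-generator scans over changed_files with one accumulator-threaded loop maintaining has_code/has_doc that breaks early once both are true.
import Mathlib
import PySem

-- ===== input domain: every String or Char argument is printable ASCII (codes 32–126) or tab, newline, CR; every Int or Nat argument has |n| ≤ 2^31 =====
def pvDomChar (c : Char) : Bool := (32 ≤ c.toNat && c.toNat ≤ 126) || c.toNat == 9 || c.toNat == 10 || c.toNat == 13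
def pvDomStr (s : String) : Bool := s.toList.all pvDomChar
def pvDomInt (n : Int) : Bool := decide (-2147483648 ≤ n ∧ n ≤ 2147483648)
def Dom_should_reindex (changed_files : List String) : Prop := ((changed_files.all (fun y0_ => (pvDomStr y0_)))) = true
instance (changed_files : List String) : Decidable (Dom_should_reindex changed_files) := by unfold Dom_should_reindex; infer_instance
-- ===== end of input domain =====

-- B: one accumulator-threaded pass with early exit instead of A's two any()-scans (alternative decomposition).
-- ===== PORT A =====
def should_reindex (changed_files : List String) : Bool × Bool :=
  let code_patterns : List String := [".py"]
  let doc_patterns : List String := [".md"]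
  let has_code_changes :=
    changed_files.any (fun f => code_patterns.any (fun ext => PySem.Str.endswith f ext))
  let has_doc_changes :=
    changed_files.any (fun f => doc_patterns.any (fun ext => PySem.Str.endswith f ext))
  (has_code_changes, has_doc_changes)

-- ===== PORT B =====
-- loop over the list threading (has_code, has_doc), early break once both are true
def should_reindex_alt_loop (fs : List String) (has_code has_doc : Bool) : Bool × Bool :=
  match fs with
  | [] => (has_code, has_doc)
  | f :: rest =>
    let has_code := if PySem.Str.endswith f ".py" then true else has_code
    let has_doc := if PySem.Str.endswith f ".md" then true else has_doc
    if has_code && has_doc then (has_code, has_doc)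
    else should_reindex_alt_loop rest has_code has_doc

def should_reindex_alt (changed_files : List String) : Bool × Bool :=
  should_reindex_alt_loop changed_files false false

-- ===== PRECONDITION & SPEC =====
def Spec_should_reindex (changed_files : List String) (out : Bool × Bool) : Prop := out = should_reindex_alt changed_files
instance (changed_files : List String) (out : Bool × Bool) : Decidable (Spec_should_reindex changed_files out) := by unfold Spec_should_reindex; infer_instance

-- ===== CLAIM (what is proved, stated in full; the proofs are below) =====
def Claim_equal_should_reindex : Prop := ∀ (changed_files : List String), Dom_should_reindex changed_files → Spec_should_reindex changed_files (should_reindex changed_files)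

-- ===== LEMMAS AND PROOFS =====
theorem loop_char (fs : List String) (c d : Bool) :
    should_reindex_alt_loop fs c d =
      (c || fs.any (fun f => PySem.Str.endswith f ".py"),
       d || fs.any (fun f => PySem.Str.endswith f ".md")) := by
  induction fs generalizing c d with
  | nil => simp [should_reindex_alt_loop]
  | cons f rest ih =>
    rw [should_reindex_alt_loop]
    cases hp : PySem.Str.endswith f ".py" <;> cases hm : PySem.Str.endswith f ".md" <;>
      simp only [List.any_cons, hp, hm, Bool.false_or, Bool.true_or, if_true, if_false,
        Bool.false_eq_true, Bool.and_true, Bool.true_and] <;>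
      [skip; skip; skip; simp]
    · by_cases hcd : (c && d) = true
      · rcases Bool.and_eq_true_iff.mp hcd with ⟨h1, h2⟩
        simp [h1, h2]
      · rw [if_neg hcd, ih]
    · by_cases hc : c = true
      · simp [hc]
      · simp [Bool.of_not_eq_true hc, ih]
    · by_cases hd : d = true
      · simp [hd]
      · simp [Bool.of_not_eq_true hd, ih]

-- ===== VERDICT (by name: the statement is the Claim_ definition above) =====
theorem should_reindex_spec : Claim_equal_should_reindex := by
  intro changed_files _
  unfold Spec_should_reindex should_reindex should_reindex_alt
  rw [loop_char]
  simp
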